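-- pv_equiv track=rewrite | github.com/vidishraj/LeetCode | 2568-minimum-impossible-or/2568-minimum-impossible-or.py | minImpossibleOR
-- ===== SOURCE A (Python) =====
-- from typing import List
--
-- def minImpossibleOR(nums: List[int]) -> int:
--     # Find the lowest power of 2 and use it if [1, 2] in the list then [1, 2^3 +1 ] range of numbers can be formed
--     setNums = set(nums)
--     solution = 0
--     for i in range(32):
--         current = 2** i
--         currentInNums=False
--         for num in setNums:
--             if num == current:
--                 currentInNums = True
--         if currentInNums:
--             solution+=current
--         else:
--             return solution+1
--     return solution+1
-- ===== SOURCE B (Python) =====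
-- def minImpossibleOR(nums):
--     # Single pass: record each power of two present as a bit in an integer mask,
--     # then scan for the lowest clear bit.
--     mask = 0
--     for x in nums:
--         if x > 0 and x & (x - 1) == 0:
--             mask |= x
--     k = 0
--     while (mask >> k) & 1:
--         k += 1
--     return 1 << k
-- ===== Notes on version B (the rewrite author's own statement) =====
-- stated objective: faster
-- what changed: Replaces A's loop over all 32 powers of two, each with a full membership scan of the set, by a single pass over nums that ORs each power-of-two element (detected by x&(x-1)==0) into a bitmask, then returns the lowest clear bit of the mask.
import Mathlib
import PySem

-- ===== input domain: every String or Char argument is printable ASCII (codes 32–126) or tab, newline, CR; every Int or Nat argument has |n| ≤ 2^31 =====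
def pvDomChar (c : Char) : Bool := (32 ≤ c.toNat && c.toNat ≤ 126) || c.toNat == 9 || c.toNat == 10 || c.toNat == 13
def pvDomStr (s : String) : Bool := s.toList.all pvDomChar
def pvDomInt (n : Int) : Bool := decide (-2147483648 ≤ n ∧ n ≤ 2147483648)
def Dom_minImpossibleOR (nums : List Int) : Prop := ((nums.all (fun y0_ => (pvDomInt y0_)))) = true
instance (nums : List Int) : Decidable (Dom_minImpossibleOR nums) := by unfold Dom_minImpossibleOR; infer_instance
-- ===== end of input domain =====

-- B replaces A's loop over all 32 powers of two (each with a full scan of the set) by a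
-- single pass over nums building a bitmask of the powers of two present, then scanning
-- that mask for its lowest clear bit; equivalence is proved on the stated domain.

-- ===== PORT A =====
-- inner 'for num in setNums: if num == current: currentInNums = True'
def pvMemberA (s : List Int) (current : Int) : Bool :=
  s.foldl (fun b num => if num == current then true else b) false

-- 'for i in range(32): …' with the early return; falls through to 'return solution+1'
def pvLoopA (s : List Int) (i : Nat) (solution : Int) : Int :=
  if _ : i < 32 then
    let current : Int := 2 ^ i
    if pvMemberA s current then pvLoopA s (i + 1) (solution + current)
    else solution + 1
  else solution + 1
termination_by 32 - i

def minImpossibleOR (nums : List Int) : Int :=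
  pvLoopA (PySem.Set.ofList nums) 0 0

-- ===== PORT B =====
-- 'for x in nums: if x > 0 and x & (x - 1) == 0: mask |= x'
-- (Int.land / Int.lor / Int.shiftRight / Int.shiftLeft are Python's &, |, >>, << on int)
def pvMaskB (nums : List Int) : Int :=
  nums.foldl (fun m x => if 0 < x ∧ Int.land x (x - 1) = 0 then Int.lor m x else m) 0

-- 'while (mask >> k) & 1: k += 1' — fuel 33 is enough on the stated domain (mask < 2^32 there)
def pvScanB (mask : Int) : Nat → Nat → Nat
  | 0, k => k
  | fuel + 1, k => if Int.land (Int.shiftRight mask k) 1 = 1 then pvScanB mask fuel (k + 1) else k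

def minImpossibleOR_alt (nums : List Int) : Int :=
  let mask := pvMaskB nums
  Int.shiftLeft 1 (pvScanB mask 33 0)

-- ===== PRECONDITION & SPEC =====
def Spec_minImpossibleOR (nums : List Int) (out : Int) : Prop := out = minImpossibleOR_alt nums
instance (nums : List Int) (out : Int) : Decidable (Spec_minImpossibleOR nums out) := by unfold Spec_minImpossibleOR; infer_instance

-- ===== CLAIM (what is proved, stated in full; the proofs are below) =====
def Claim_equal_minImpossibleOR : Prop := ∀ (nums : List Int), Dom_minImpossibleOR nums → Spec_minImpossibleOR nums (minImpossibleOR nums)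

-- ===== LEMMAS AND PROOFS =====

-- a > 0 with a & (a-1) == 0 forces a to be a power of two (Nat level)
theorem pv_land_pred_pow {a : Nat} (ha : a ≠ 0) (h : a &&& (a - 1) = 0) : ∃ j, a = 2 ^ j := by
  induction a using Nat.strong_induction_on with
  | _ a ih =>
    rcases Nat.even_or_odd a with ⟨b, hb⟩ | ⟨b, hb⟩
    · -- a = 2*b, b ≠ 0
      have hb2 : a = 2 * b := by omega
      have hbne : b ≠ 0 := by omega
      rw [hb2, (by omega : 2 * b - 1 = 2 * (b - 1) + 1)] at h
      have key : 2 * b &&& (2 * (b - 1) + 1) = 2 * (b &&& (b - 1)) := by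
        have := Nat.land_bit false b true (b - 1)
        simpa [Nat.bit] using this
      rw [key] at h
      obtain ⟨j, hj⟩ := ih b (by omega) hbne (by omega)
      exact ⟨j + 1, by rw [hb2, hj, pow_succ]; ring⟩
    · -- a = 2*b + 1
      have hb2 : a = 2 * b + 1 := by omega
      rw [hb2, (by omega : 2 * b + 1 - 1 = 2 * b)] at h
      have key : (2 * b + 1) &&& (2 * b) = 2 * (b &&& b) := by
        have := Nat.land_bit true b false b
        simpa [Nat.bit] using this
      rw [key] at h
      have hbb : b &&& b = b := by simp
      rw [hbb] at h
      exact ⟨0, by omega⟩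

theorem pv_pow_land_pred (j : Nat) : (2 ^ j) &&& (2 ^ j - 1) = 0 := by
  simp

-- Int-level bitwise ops on naturals are the Nat ops
theorem pv_cast_land (m n : Nat) : Int.land (m : Int) (n : Int) = ((m &&& n : Nat) : Int) := rfl
theorem pv_cast_lor (m n : Nat) : Int.lor (m : Int) (n : Int) = ((m ||| n : Nat) : Int) := rfl

-- the mask fold: bits of the mask are exactly the powers of two among the processed elements
theorem pv_mask_fold (l : List Int) (n : Nat) :
    ∃ n' : Nat, l.foldl (fun m x => if 0 < x ∧ Int.land x (x - 1) = 0 then Int.lor m x else m) (n : Int) = (n' : Int) ∧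
      ∀ j, n'.testBit j = (n.testBit j || decide ((2 : Int) ^ j ∈ l)) := by
  induction l generalizing n with
  | nil => exact ⟨n, rfl, by simp⟩
  | cons x l ih =>
    by_cases hc : 0 < x ∧ Int.land x (x - 1) = 0
    · obtain ⟨hx, hl⟩ := hc
      have hxa : x = (x.toNat : Int) := by omega
      set a := x.toNat with hadef
      have ha0 : a ≠ 0 := by omega
      have hsub : x - 1 = ((a - 1 : Nat) : Int) := by omega
      have hland : a &&& (a - 1) = 0 := by
        have h2 : Int.land (a : Int) ((a - 1 : Nat) : Int) = 0 := by rw [← hxa, ← hsub]; exact hl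
        rw [pv_cast_land] at h2
        exact_mod_cast h2
      obtain ⟨j0, hj0⟩ := pv_land_pred_pow ha0 hland
      obtain ⟨n', hfold, hbits⟩ := ih (n ||| a)
      refine ⟨n', ?_, ?_⟩
      · rw [List.foldl_cons, if_pos (⟨hx, hl⟩ : 0 < x ∧ Int.land x (x - 1) = 0), hxa, pv_cast_lor]
        exact hfold
      · intro j
        rw [hbits j]
        have hxpow : ((2 : Int) ^ j = x) ↔ (j = j0) := by
          rw [hxa, hj0]
          have hcast : (((2 ^ j0 : Nat) : Int)) = (2 : Int) ^ j0 := by push_cast; ring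
          rw [hcast]
          constructor
          · intro h
            exact Nat.pow_right_injective (a := 2) (by norm_num) (by exact_mod_cast h)
          · intro h; rw [h]
        have hdx : decide ((2 : Int) ^ j = x) = decide (j = j0) := by simp [hxpow]
        have hcomm : decide (j0 = j) = decide (j = j0) := by simp [eq_comm]
        simp only [List.mem_cons, Nat.testBit_lor, hj0, Nat.testBit_two_pow, Bool.decide_or,
          hdx, hcomm, Bool.or_assoc]
    · obtain ⟨n', hfold, hbits⟩ := ih n
      refine ⟨n', by simpa [hc] using hfold, ?_⟩
      intro j
      rw [hbits j]
      have hxne : (2 : Int) ^ j ≠ x := by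
        intro h
        apply hc
        refine ⟨by rw [← h]; positivity, ?_⟩
        rw [← h]
        have h1 : (2 : Int) ^ j = ((2 ^ j : Nat) : Int) := by push_cast; ring
        have h2 : (2 : Int) ^ j - 1 = ((2 ^ j - 1 : Nat) : Int) := by
          rw [Nat.cast_sub (Nat.one_le_two_pow)]
          push_cast; ring
        rw [h2, h1, pv_cast_land, pv_pow_land_pred]
        rfl
      simp [hxne]

-- the inner scan of A computes set membership
theorem pv_member_eq (s : List Int) (c : Int) :
    ∀ b : Bool, s.foldl (fun b num => if num == c then true else b) b = (b || decide (c ∈ s)) := by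
  induction s with
  | nil => simp
  | cons x s ih =>
    intro b
    rw [List.foldl_cons]
    by_cases hx : x = c
    · subst hx
      rw [if_pos (by simp), ih]
      simp
    · rw [if_neg (by simp [hx]), ih]
      simp [List.mem_cons, Ne.symm hx]

-- the Int-level while guard reads bit k of the mask
theorem pv_guard_eq (M : Nat) (k : Nat) :
    (Int.land (Int.shiftRight (M : Int) k) 1 = 1) ↔ M.testBit k = true := by
  have h1 : Int.land (Int.shiftRight (M : Int) k) 1 = (((M >>> k) &&& 1 : Nat) : Int) := rfl
  rw [h1, show (1 : Int) = ((1 : Nat) : Int) from rfl, Nat.cast_inj, Nat.and_one_is_mod]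
  simp [Nat.testBit, Nat.and_one_is_mod, Nat.land_comm]

theorem pv_one_shiftLeft (k : Nat) : Int.shiftLeft 1 k = 2 ^ k := by
  have h : Int.shiftLeft 1 k = (((1 <<< k : Nat)) : Int) := rfl
  rw [h, Nat.one_shiftLeft]
  push_cast; ring

-- main loop correspondence: A's scan over powers vs B's scan over mask bits
theorem pv_loop_eq (s : List Int) (M : Nat)
    (hbit : ∀ j, M.testBit j = decide ((2 : Int) ^ j ∈ s))
    (h32 : M.testBit 32 = false) :
    ∀ fuel k, k + fuel = 33 →
      pvLoopA s k ((2 : Int) ^ k - 1) = Int.shiftLeft 1 (pvScanB (M : Int) fuel k) := by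
  intro fuel
  induction fuel with
  | zero =>
    intro k hk
    have hk33 : k = 33 := by omega
    subst hk33
    rw [pvLoopA, pvScanB]
    simp [pv_one_shiftLeft]
  | succ fuel ih =>
    intro k hk
    rw [pvLoopA, pvScanB]
    by_cases hk32 : k < 32
    · have hmem : pvMemberA s ((2 : Int) ^ k) = decide ((2 : Int) ^ k ∈ s) := by
        unfold pvMemberA; rw [pv_member_eq]; simp
      by_cases hin : (2 : Int) ^ k ∈ s
      · have hbk : M.testBit k = true := by rw [hbit k]; simp [hin]
        have hg : Int.land (Int.shiftRight (M : Int) k) 1 = 1 := (pv_guard_eq M k).mpr hbk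
        have hsol : (2 : Int) ^ k - 1 + 2 ^ k = 2 ^ (k + 1) - 1 := by rw [pow_succ]; ring
        simp only [hk32, dif_pos, hmem, hin, decide_true, if_true, hg, hsol]
        exact ih (k + 1) (by omega)
      · have hbk : M.testBit k = false := by rw [hbit k]; simp [hin]
        have hg : ¬ (Int.land (Int.shiftRight (M : Int) k) 1 = 1) := by
          rw [pv_guard_eq]; simp [hbk]
        rw [if_neg hg, dif_pos hk32]
        simp only [hmem, hin, decide_false, Bool.false_eq_true, if_false, pv_one_shiftLeft]
        ring
    · have hk32' : k = 32 := by omega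
      subst hk32'
      have hg : ¬ (Int.land (Int.shiftRight (M : Int) 32) 1 = 1) := by
        rw [pv_guard_eq]; simp [h32]
      rw [if_neg hg, dif_neg hk32, pv_one_shiftLeft]
      ring

-- ===== VERDICT (by name: the statement is the Claim_ definition above) =====
theorem minImpossibleOR_spec : Claim_equal_minImpossibleOR := by
  intro nums hdom
  unfold Spec_minImpossibleOR minImpossibleOR minImpossibleOR_alt
  obtain ⟨M, hfold, hbits⟩ := pv_mask_fold nums 0
  have hm : pvMaskB nums = (M : Int) := hfold
  have hbit : ∀ j, M.testBit j = decide ((2 : Int) ^ j ∈ PySem.Set.ofList nums) := by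
    intro j; rw [hbits j]; simp [PySem.Set.mem_ofList]
  have h32 : M.testBit 32 = false := by
    rw [hbit 32]
    simp only [decide_eq_false_iff_not, PySem.Set.mem_ofList]
    intro hmem
    unfold Dom_minImpossibleOR at hdom
    rw [List.all_eq_true] at hdom
    have := hdom _ hmem
    simp [pvDomInt] at this
  have hloop := pv_loop_eq (PySem.Set.ofList nums) M hbit h32 33 0 rfl
  rw [hm]
  simpa using hloop
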